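-- pv_equiv track=rewrite | github.com/hyperledger/indy-plenum | plenum/cli/cli.py | mask_seed
-- ===== SOURCE A (Python) =====
-- def mask_seed(cmd_text):
--     parts = cmd_text.split()
--     prev_seed = False
--     for idx, val in enumerate(parts):
--         if prev_seed:
--             parts[idx] = "[redacted]"
--         prev_seed = (val == "seed")
--     return " ".join(parts)
-- ===== SOURCE B (Python) =====
-- def mask_seed(cmd_text):
--     parts = cmd_text.split()
--     redact = {i + 1 for i, t in enumerate(parts) if t == "seed"}
--     return " ".join("[redacted]" if i in redact else t
--                     for i, t in enumerate(parts))
-- ===== Notes on version B (the rewrite author's own statement) =====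
-- stated objective: alternative
-- what changed: Replaced A's single stateful loop (prev_seed flag with in-place index assignment) by two passes: precompute the set of indices that immediately follow the keyword being masked, then rebuild the token list by membership lookup.
import Mathlib
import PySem

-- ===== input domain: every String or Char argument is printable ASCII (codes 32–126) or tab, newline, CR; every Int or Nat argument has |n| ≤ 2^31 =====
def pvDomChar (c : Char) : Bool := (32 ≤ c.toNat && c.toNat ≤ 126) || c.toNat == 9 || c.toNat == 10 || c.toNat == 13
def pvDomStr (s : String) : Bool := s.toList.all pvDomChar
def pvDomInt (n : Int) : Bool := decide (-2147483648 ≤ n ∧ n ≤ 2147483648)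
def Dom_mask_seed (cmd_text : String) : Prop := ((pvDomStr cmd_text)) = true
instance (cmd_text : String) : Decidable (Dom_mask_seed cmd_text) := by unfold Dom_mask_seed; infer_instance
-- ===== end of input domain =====

-- B replaces A's stateful prev-flag loop with a precomputed set of indices to redact
-- plus a separate rebuild pass (objective: alternative decomposition, same cost).

-- ===== PORT A =====
-- for idx, val in enumerate(parts): if prev_seed: parts[idx] = "[redacted]"; prev_seed = (val == "seed")
def mask_seed (cmd_text : String) : String :=
  let parts := PySem.Str.split₀ cmd_text
  let st := (PySem.List.enumerate parts 0).foldl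
    (fun (st : List String × Bool) p =>
      ((if st.2 then PySem.List.pySetD st.1 p.1 "[redacted]" else st.1), p.2 == "seed"))
    (parts, false)
  PySem.Str.join " " st.1

-- ===== PORT B =====
-- redact = {i+1 for i,t in enumerate(parts) if t=="seed"}; join of the second pass
def mask_seed_alt (cmd_text : String) : String :=
  let parts := PySem.Str.split₀ cmd_text
  let redact : PySem.Set Int :=
    PySem.Set.ofList (((PySem.List.enumerate parts 0).filter (fun p => p.2 == "seed")).map (fun p => p.1 + 1))
  PySem.Str.join " "
    ((PySem.List.enumerate parts 0).map
      (fun p => if PySem.Set.contains redact p.1 then "[redacted]" else p.2))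

-- ===== PRECONDITION & SPEC =====
def Spec_mask_seed (cmd_text : String) (out : String) : Prop := out = mask_seed_alt cmd_text
instance (cmd_text : String) (out : String) : Decidable (Spec_mask_seed cmd_text out) := by unfold Spec_mask_seed; infer_instance

-- ===== CLAIM (what is proved, stated in full; the proofs are below) =====
def Claim_equal_mask_seed : Prop := ∀ (cmd_text : String), Dom_mask_seed cmd_text → Spec_mask_seed cmd_text (mask_seed cmd_text)

-- ===== LEMMAS AND PROOFS =====

-- common functional characterisation of the masked token list
def goSpec : Bool → List String → List String
  | _, [] => []
  | prev, v :: rest => (if prev then "[redacted]" else v) :: goSpec (v == "seed") rest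

-- A-side: the in-place fold over the enumerated suffix refines goSpec
lemma foldA (rest pre : List String) (prev : Bool) :
    ((PySem.List.enumerate rest (pre.length : Int)).foldl
      (fun (st : List String × Bool) p =>
        ((if st.2 then PySem.List.pySetD st.1 p.1 "[redacted]" else st.1), p.2 == "seed"))
      (pre ++ rest, prev)).1
    = pre ++ goSpec prev rest := by
  induction rest generalizing pre prev with
  | nil => simp [PySem.List.enumerate_nil, goSpec]
  | cons v vs ih =>
    rw [PySem.List.enumerate_cons]
    simp only [List.foldl_cons]
    by_cases hp : prev = true
    · have hset : PySem.List.pySetD (pre ++ v :: vs) (pre.length : Int) "[redacted]"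
          = pre ++ "[redacted]" :: vs := by
        have hlt : pre.length < (pre ++ v :: vs).length := by simp
        simp [PySem.List.pySetD, PySem.List.pySet?_natCast _ _ _ hlt]
      have := ih (pre ++ ["[redacted]"]) (v == "seed")
      simp only [List.append_assoc, List.singleton_append, List.length_append,
        List.length_singleton] at this
      simp only [hp, if_true, hset]
      rw [show ((pre.length : Int) + 1) = ((pre.length + 1 : Nat) : Int) by push_cast; ring]
      rw [show (pre.length + 1) = (pre ++ ["[redacted]"]).length by simp]
      have := ih (pre ++ ["[redacted]"]) (v == "seed")
      rw [show pre ++ "[redacted]" :: vs = (pre ++ ["[redacted]"]) ++ vs by simp] at *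
      rw [this]
      simp [goSpec]
    · have hp' : prev = false := by revert hp; cases prev <;> simp
      have := ih (pre ++ [v]) (v == "seed")
      simp only [hp', if_false, Bool.false_eq_true]
      rw [show ((pre.length : Int) + 1) = (((pre ++ [v]).length : Nat) : Int) by push_cast; simp]
      rw [show pre ++ v :: vs = (pre ++ [v]) ++ vs by simp]
      rw [this]
      simp [goSpec]

-- B-side: a second pass driven by any predicate P matching "previous token is seed"
lemma mapB (rest : List String) (n : Int) (P : Int → Bool) (prev : Bool)
    (H : ∀ (k : Nat) (_hlt : k < rest.length),
      P (n + k) = (if hk : k = 0 then prev else rest[k - 1]'(by omega) == "seed")) :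
    (PySem.List.enumerate rest n).map (fun p => if P p.1 then "[redacted]" else p.2)
      = goSpec prev rest := by
  induction rest generalizing n prev with
  | nil => simp [PySem.List.enumerate_nil, goSpec]
  | cons v vs ih =>
    rw [PySem.List.enumerate_cons]
    simp only [List.map_cons, goSpec]
    have h0 := H 0 (by simp)
    simp only [Nat.cast_zero, add_zero, dite_eq_ite, if_true] at h0
    rw [h0]
    congr 1
    · apply ih (n + 1) (v == "seed")
      intro k hk
      have hk1 : k + 1 < (v :: vs).length := by simpa using Nat.succ_lt_succ hk
      have := H (k + 1) hk1
      simp only [Nat.add_sub_cancel] at this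
      rw [show n + 1 + (k : Int) = n + ((k + 1 : Nat) : Int) by push_cast; ring, this]
      rcases k with _ | k
      · simp
      · simp

lemma mem_redact_iff (l : List String) (i : Int) :
    (i ∈ ((PySem.List.enumerate l 0).filter (fun p => p.2 == "seed")).map (fun p => p.1 + 1))
      ↔ ∃ (j : Nat) (h : j < l.length), l[j] == "seed" ∧ i = (j : Int) + 1 := by
  simp only [List.mem_map, List.mem_filter]
  constructor
  · rintro ⟨p, ⟨hp, hs⟩, rfl⟩
    rcases (PySem.List.mem_enumerate_iff _ _ _).1 hp with ⟨k, hk, rfl⟩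
    exact ⟨k, hk, by simpa using hs, by simp⟩
  · rintro ⟨j, hj, hs, rfl⟩
    exact ⟨((j : Int), l[j]), ⟨(PySem.List.mem_enumerate_iff _ _ _).2 ⟨j, hj, by simp⟩, hs⟩, rfl⟩

-- ===== VERDICT (by name: the statement is the Claim_ definition above) =====
theorem mask_seed_spec : Claim_equal_mask_seed := by
  intro cmd_text _
  unfold Spec_mask_seed
  simp only [mask_seed, mask_seed_alt]
  set l := PySem.Str.split₀ cmd_text with hl
  congr 1
  have hA := foldA l [] false
  simp only [List.nil_append, List.length_nil, Nat.cast_zero] at hA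
  rw [hA]
  symm
  apply mapB l 0 _ false
  intro k hk
  simp only [zero_add]
  rw [show (PySem.Set.contains _ (k : Int)) =
      decide ((k : Int) ∈ ((PySem.List.enumerate l 0).filter (fun p => p.2 == "seed")).map (fun p => p.1 + 1)) from ?_]
  · rcases k with _ | k
    · rw [dif_pos rfl]
      simp [mem_redact_iff]
      intro j hj hs h
      omega
    · simp only [dif_neg (Nat.succ_ne_zero k)]
      simp only [mem_redact_iff]
      rcases h : (l[k + 1 - 1]'(by omega) == "seed") with _ | _
      · simp only [Nat.add_sub_cancel] at h
        simp only [decide_eq_false_iff_not]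
        rintro ⟨j, hj, hs, hij⟩
        have : j = k := by omega
        subst this
        simp [h] at hs
      · simp only [Nat.add_sub_cancel] at h
        simp only [decide_eq_true_eq]
        exact ⟨k, by omega, h, by push_cast; ring⟩
  · rw [Bool.eq_iff_iff]
    simp
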